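-- pv_equiv track=rewrite | github.com/ivango17/Bioinformatics_Challenges | rosalind/open_reading_f.py | protein_string
-- ===== SOURCE A (Python) =====
-- def protein_string(orf_dict):
--     '''Takes a dictionary containing 3 open reading frames for either plus or minus strand and return all possible poly peptides (starting with methionine and ending with a stop codon).'''
--     polypeptides = []
--     for key in orf_dict:
--         for i in range(len(orf_dict[key])):
--             if orf_dict[key][i] == "M":
--                 cur_protein = ""
--                 for j in range(len(orf_dict[key]) - i):
--                     if orf_dict[key][i + j] == "*":
--                         frame_pep = (key, cur_protein)
--                         polypeptides.append(frame_pep)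
--                         break
--                     else:
--                         cur_protein += orf_dict[key][i + j]
--
--     return polypeptides
-- ===== SOURCE B (Python) =====
-- def protein_string(orf_dict):
--     '''Single left-to-right pass per frame: maintain the list of open peptides
--     (one per M seen since the last stop), emit them all at each stop codon.'''
--     polypeptides = []
--     for key, seq in orf_dict.items():
--         open_peps = []
--         for ch in seq:
--             if ch == '*':
--                 for pep in open_peps:
--                     polypeptides.append((key, pep))
--                 open_peps = []
--             else:
--                 if ch == 'M':
--                     open_peps.append("")
--                 open_peps = [pep + ch for pep in open_peps]
--     return polypeptides
-- ===== Notes on version B (the rewrite author's own statement) =====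
-- stated objective: alternative
-- what changed: Replaces A's nested per-M rescan (for every 'M' a fresh inner loop walks forward to the next '*') by a single left-to-right pass per frame that maintains the list of open peptides since the last stop and emits them all when a stop codon is reached.
import Mathlib
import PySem

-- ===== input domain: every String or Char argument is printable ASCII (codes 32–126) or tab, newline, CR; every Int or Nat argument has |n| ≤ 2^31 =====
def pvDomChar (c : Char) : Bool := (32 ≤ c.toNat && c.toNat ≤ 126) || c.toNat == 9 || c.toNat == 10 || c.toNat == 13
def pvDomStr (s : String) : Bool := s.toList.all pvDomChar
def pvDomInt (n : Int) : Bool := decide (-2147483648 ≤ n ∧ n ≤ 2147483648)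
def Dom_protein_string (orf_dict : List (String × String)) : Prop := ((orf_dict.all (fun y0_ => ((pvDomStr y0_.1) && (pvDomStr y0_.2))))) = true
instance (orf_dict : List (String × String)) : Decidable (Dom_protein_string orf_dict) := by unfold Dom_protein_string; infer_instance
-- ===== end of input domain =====

-- B replaces A's per-M rescan-to-stop with a single left-to-right pass per frame that
-- maintains the open peptides since the last stop and emits them at each stop (alternative decomposition).

-- ===== PORT A =====
-- inner loop 'for j in range(len(s) - i): … break …' of A, as recursion on j
def pvAScan (s : List Char) (i j : Nat) (cur : List Char) : Option (List Char) :=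
  if h : j < s.length - i then
    if s.getD (i + j) ' ' = '*' then some cur
    else pvAScan s i (j + 1) (cur ++ [s.getD (i + j) ' '])
  else none
termination_by s.length - i - j
decreasing_by omega

def protein_string (orf_dict : List (String × String)) : List (String × String) :=
  let d := PySem.Dict.ofList orf_dict
  d.keys.foldl (fun polys key =>
    let s := (d.getD key "").toList
    (List.range s.length).foldl (fun acc i =>
      if s.getD i ' ' = 'M' then
        match pvAScan s i 0 [] with
        | some cur => acc ++ [(key, String.ofList cur)]
        | none => acc
      else acc) polys) []

-- ===== PORT B =====
-- one step of B's single pass: emit all open peptides at '*', else extend them (opening one at 'M')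
def pvBStep (key : String) (st : List (String × String) × List (List Char)) (c : Char) :
    List (String × String) × List (List Char) :=
  if c = '*' then
    (st.1 ++ st.2.map (fun p => (key, String.ofList p)), [])
  else
    let opens := if c = 'M' then st.2 ++ [[]] else st.2
    (st.1, opens.map (fun p => p ++ [c]))

def protein_string_alt (orf_dict : List (String × String)) : List (String × String) :=
  (PySem.Dict.ofList orf_dict).items.foldl
    (fun polys kv => (kv.2.toList.foldl (pvBStep kv.1) (polys, [])).1) []

-- ===== PRECONDITION & SPEC =====
def Spec_protein_string (orf_dict : List (String × String)) (out : List (String × String)) : Prop := out = protein_string_alt orf_dict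
instance (orf_dict : List (String × String)) (out : List (String × String)) : Decidable (Spec_protein_string orf_dict out) := by unfold Spec_protein_string; infer_instance

-- ===== CLAIM (what is proved, stated in full; the proofs are below) =====
def Claim_equal_protein_string : Prop := ∀ (orf_dict : List (String × String)), Dom_protein_string orf_dict → Spec_protein_string orf_dict (protein_string orf_dict)

-- ===== LEMMAS AND PROOFS =====

-- the peptides of one frame string, by structural recursion (proof-only specification)
def pvP : List Char → List (List Char)
  | [] => []
  | c :: t => (if c = 'M' ∧ '*' ∈ t then [c :: t.takeWhile (· ≠ '*')] else []) ++ pvP t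


lemma pvAScan_eq (s : List Char) (i j : Nat) (cur : List Char) :
    pvAScan s i j cur =
      if '*' ∈ s.drop (i + j) then some (cur ++ (s.drop (i + j)).takeWhile (· ≠ '*')) else none := by
  fun_induction pvAScan s i j cur with
  | case1 j cur h hstar =>
      have hij : i + j < s.length := by omega
      rw [List.drop_eq_getElem_cons hij]
      rw [List.getD_eq_getElem s ' ' hij] at hstar
      simp [hstar]
  | case2 j cur h hstar ih =>
      have hij : i + j < s.length := by omega
      rw [List.getD_eq_getElem s ' ' hij] at hstar ih ⊢
      rw [show i + (j + 1) = i + j + 1 from by omega] at ih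
      rw [ih, List.drop_eq_getElem_cons hij]
      have hx : ('*' : Char) ≠ s[i + j] := fun he => hstar he.symm
      by_cases hm : '*' ∈ List.drop (i + j + 1) s
      · rw [if_pos hm, if_pos (List.mem_cons_of_mem _ hm), List.takeWhile_cons]
        have hd : (decide (s[i + j] ≠ '*')) = true := by simp [hstar]
        rw [hd]
        simp
      · rw [if_neg hm, if_neg (by simp only [List.mem_cons, not_or]; exact ⟨hx, hm⟩)]
  | case3 j cur h =>
      have : s.length ≤ i + j := by omega
      simp [List.drop_eq_nil_of_le this]

lemma pvA_flat (s : List Char) :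
    (List.range s.length).flatMap
      (fun i => if s.getD i ' ' = 'M' ∧ '*' ∈ s.drop i
                then [(s.drop i).takeWhile (· ≠ '*')] else []) = pvP s := by
  induction s with
  | nil => simp [pvP]
  | cons c t ih =>
      rw [List.length_cons, List.range_succ_eq_map, List.flatMap_cons, List.flatMap_map]
      have hshift : ∀ i : Nat,
          (fun i => if (c :: t).getD i ' ' = 'M' ∧ '*' ∈ (c :: t).drop i
                    then [((c :: t).drop i).takeWhile (· ≠ '*')] else []) (Nat.succ i)
          = (fun i => if t.getD i ' ' = 'M' ∧ '*' ∈ t.drop i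
                    then [(t.drop i).takeWhile (· ≠ '*')] else []) i := by
        intro i; rfl
      rw [funext hshift, ih, pvP]
      congr 1
      by_cases hc : c = 'M'
      · subst hc
        have h1 : ('*' ∈ 'M' :: t) = ('*' ∈ t) := by simp
        simp only [List.getD_cons_zero, List.drop_zero, h1, true_and]
        by_cases hm : '*' ∈ t
        · rw [if_pos hm, if_pos hm, List.takeWhile_cons]
          simp
        · rw [if_neg hm, if_neg hm]
      · rw [if_neg (by simp [hc]), if_neg (by simp [hc])]

lemma pvAKey (key : String) (s : List Char) (polys : List (String × String)) :
    (List.range s.length).foldl (fun acc i =>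
      if s.getD i ' ' = 'M' then
        match pvAScan s i 0 [] with
        | some cur => acc ++ [(key, String.ofList cur)]
        | none => acc
      else acc) polys = polys ++ (pvP s).map (fun p => (key, String.ofList p)) := by
  rw [PySem.List.foldl_congr_mem (List.range s.length) _
    (fun acc i => acc ++ ((if s.getD i ' ' = 'M' ∧ '*' ∈ s.drop i
                then [(s.drop i).takeWhile (· ≠ '*')] else []).map
        (fun p => (key, String.ofList p)))) polys ?_]
  · rw [PySem.List.foldl_append_eq_flatMap, ← List.map_flatMap, pvA_flat]
  · intro acc i _
    rw [pvAScan_eq]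
    simp only [Nat.add_zero, List.nil_append]
    split_ifs with h1 h2 h3 <;> simp_all

lemma pvBFold (key : String) (s : List Char) (polys : List (String × String))
    (opens : List (List Char)) :
    (s.foldl (pvBStep key) (polys, opens)).1 =
      polys ++ (if '*' ∈ s then opens.map (fun p => (key, String.ofList (p ++ s.takeWhile (· ≠ '*')))) else [])
            ++ (pvP s).map (fun p => (key, String.ofList p)) := by
  induction s generalizing polys opens with
  | nil => simp [pvP]
  | cons c t ih =>
      rw [List.foldl_cons]
      by_cases hc : c = '*'
      · subst hc
        rw [show pvBStep key (polys, opens) '*' = (polys ++ opens.map (fun p => (key, String.ofList p)), []) from rfl]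
        rw [ih, pvP]
        simp
      · rw [show pvBStep key (polys, opens) c =
          (polys, ((if c = 'M' then opens ++ [[]] else opens).map (fun p => p ++ [c]))) from by
            simp [pvBStep, hc]]
        rw [ih, pvP]
        have hmem : ('*' ∈ c :: t) ↔ ('*' ∈ t) := by simp [Ne.symm hc]
        simp only [hmem, List.takeWhile_cons]
        have hd : (decide (c ≠ '*')) = true := by simp [hc]
        rw [hd]
        by_cases hM : c = 'M'
        · subst hM
          by_cases hm : '*' ∈ t
          · have hsplit : String.ofList ('M' :: List.takeWhile (fun x => !decide (x = '*')) t)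
                = "M" ++ String.ofList (List.takeWhile (fun x => !decide (x = '*')) t) := by
              rw [show ('M' :: List.takeWhile (fun x => !decide (x = '*')) t)
                  = ['M'] ++ List.takeWhile (fun x => !decide (x = '*')) t from rfl,
                String.ofList_append]
            simp [hm, List.map_map, Function.comp_def, hsplit, String.append_assoc]
          · simp [hm]
        · rw [if_neg hM, if_neg (show ¬(c = 'M' ∧ '*' ∈ t) from fun h => hM h.1)]
          by_cases hm : '*' ∈ t
          · simp [hm, List.map_map, Function.comp_def, String.append_assoc]
            intro a _
            rw [← String.ofList_append]
            rfl
          · simp [hm]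

-- ===== VERDICT (by name: the statement is the Claim_ definition above) =====
theorem protein_string_spec : Claim_equal_protein_string := by
  intro orf_dict _
  unfold Spec_protein_string protein_string protein_string_alt
  rw [PySem.Dict.items_eq_map_keys (PySem.Dict.ofList orf_dict)
      (PySem.Dict.nodup_keys_ofList orf_dict) ""]
  rw [List.foldl_map]
  apply Eq.symm
  refine PySem.List.foldl_congr_mem _ _ _ _ ?_
  intro acc key _
  rw [pvBFold key (((PySem.Dict.ofList orf_dict).getD key "").toList) acc []]
  rw [pvAKey key (((PySem.Dict.ofList orf_dict).getD key "").toList) acc]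
  simp
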